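-- pv_equiv track=rewrite | github.com/Notum-Robotics/ClusterFlock | nCore/mission/flock.py | _flock_fallback_names
-- ===== SOURCE A (Python) =====
-- def _flock_fallback_names(count, existing_names):
--     """Generate fallback names when Showrunner naming fails."""
--     _FALLBACK_NAMES = ["Alex", "Sam", "Robin", "Casey", "Morgan", "Riley", "Jordan", "Taylor"]
--     result = []
--     used = set(existing_names)
--     idx = 0
--     for _ in range(count):
--         while idx < len(_FALLBACK_NAMES) and _FALLBACK_NAMES[idx] in used:
--             idx += 1
--         name = _FALLBACK_NAMES[idx] if idx < len(_FALLBACK_NAMES) else f"Agent-{len(used) + 1}"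
--         used.add(name)
--         result.append({"name": name, "role": "general assistant", "experience": "intermediate"})
--         idx += 1
--     return result
-- ===== SOURCE B (Python) =====
-- def _flock_fallback_names(count, existing_names):
--     """Generate fallback names when Showrunner naming fails."""
--     _FALLBACK_NAMES = ["Alex", "Sam", "Robin", "Casey", "Morgan", "Riley", "Jordan", "Taylor"]
--     used = set(existing_names)
--     available = [n for n in _FALLBACK_NAMES if n not in used]
--     result = []
--     for i in range(count):
--         if i < len(available):
--             name = available[i]
--         else:
--             name = "Agent-{}".format(len(used) + 1)
--         used.add(name)
--         result.append(dict(name=name, role="general assistant", experience="intermediate"))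
--     return result
-- ===== Notes on version B (the rewrite author's own statement) =====
-- stated objective: simpler
-- what changed: Replaces A's stateful idx cursor with its nested while-skip over the fallback array by a once-computed filtered list of available names indexed directly by the flat loop counter.
import Mathlib
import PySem

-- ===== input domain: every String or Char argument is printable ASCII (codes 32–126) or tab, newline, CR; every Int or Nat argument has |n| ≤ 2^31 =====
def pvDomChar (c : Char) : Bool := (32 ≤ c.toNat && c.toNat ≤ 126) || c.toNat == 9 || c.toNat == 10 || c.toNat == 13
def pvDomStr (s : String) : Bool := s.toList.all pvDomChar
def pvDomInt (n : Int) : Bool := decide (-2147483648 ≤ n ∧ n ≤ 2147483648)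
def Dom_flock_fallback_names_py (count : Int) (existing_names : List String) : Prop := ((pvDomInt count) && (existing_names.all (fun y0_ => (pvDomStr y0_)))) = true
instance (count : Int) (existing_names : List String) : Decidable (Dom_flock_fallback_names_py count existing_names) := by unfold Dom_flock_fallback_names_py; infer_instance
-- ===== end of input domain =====

-- B computes the available fallback names once as a filtered list indexed by the loop
-- counter, replacing A's idx cursor with its nested while-skip; same results (objective: simpler).


-- ===== PORT A =====
def pvFallback : List String := ["Alex", "Sam", "Robin", "Casey", "Morgan", "Riley", "Jordan", "Taylor"]

def pvRecord (name : String) : List (String × String) :=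
  [("name", name), ("role", "general assistant"), ("experience", "intermediate")]

-- the inner 'while idx < len(_FALLBACK_NAMES) and _FALLBACK_NAMES[idx] in used: idx += 1'
def pvSkip (used : PySem.Set String) (idx : Nat) : Nat :=
  if idx < pvFallback.length ∧ PySem.Set.contains used (pvFallback.getD idx "") = true then
    pvSkip used (idx + 1)
  else idx
termination_by pvFallback.length - idx
decreasing_by omega

-- 'name = _FALLBACK_NAMES[idx] if idx < len(_FALLBACK_NAMES) else f"Agent-{len(used) + 1}"'
def pvNameA (used : PySem.Set String) (idx : Nat) : String :=
  if idx < pvFallback.length then pvFallback.getD idx ""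
  else "Agent-" ++ PySem.Int.toStr ((used.length : Int) + 1)

-- 'for _ in range(count)' body, state (result, used, idx)
def pvLoopA : Nat → List (List (String × String)) → PySem.Set String → Nat → List (List (String × String))
  | 0, result, _, _ => result
  | k + 1, result, used, idx =>
    pvLoopA k (result ++ [pvRecord (pvNameA used (pvSkip used idx))])
      (PySem.Set.add used (pvNameA used (pvSkip used idx))) (pvSkip used idx + 1)

def flock_fallback_names_py (count : Int) (existing_names : List String) : List (List (String × String)) :=
  pvLoopA count.toNat [] (PySem.Set.ofList existing_names) 0

-- ===== PORT B =====
-- 'name = available[i] if i < len(available) else f"Agent-{len(used) + 1}"'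
def pvNameB (available : List String) (used : PySem.Set String) (i : Nat) : String :=
  if i < available.length then available.getD i ""
  else "Agent-" ++ PySem.Int.toStr ((used.length : Int) + 1)

-- 'for i in range(count)' body, state (i, result, used)
def pvLoopB (available : List String) : Nat → Nat → List (List (String × String)) → PySem.Set String → List (List (String × String))
  | 0, _, result, _ => result
  | k + 1, i, result, used =>
    pvLoopB available k (i + 1) (result ++ [pvRecord (pvNameB available used i)])
      (PySem.Set.add used (pvNameB available used i))

def flock_fallback_names_py_alt (count : Int) (existing_names : List String) : List (List (String × String)) :=
  let used := PySem.Set.ofList existing_names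
  let available := pvFallback.filter (fun n => !(PySem.Set.contains used n))
  pvLoopB available count.toNat 0 [] used

-- ===== PRECONDITION & SPEC =====
def Spec_flock_fallback_names_py (count : Int) (existing_names : List String) (out : List (List (String × String))) : Prop := out = flock_fallback_names_py_alt count existing_names
instance (count : Int) (existing_names : List String) (out : List (List (String × String))) : Decidable (Spec_flock_fallback_names_py count existing_names out) := by unfold Spec_flock_fallback_names_py; infer_instance

-- ===== CLAIM (what is proved, stated in full; the proofs are below) =====
def Claim_equal_flock_fallback_names_py : Prop := ∀ (count : Int) (existing_names : List String), Dom_flock_fallback_names_py count existing_names → Spec_flock_fallback_names_py count existing_names (flock_fallback_names_py count existing_names)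

-- ===== LEMMAS AND PROOFS =====

-- pvSkip only drops fallback names that are in 'used', and stops on one that is not
lemma pvSkip_filter (u : PySem.Set String) (idx : Nat) :
    (pvFallback.drop (pvSkip u idx)).filter (fun n => !(PySem.Set.contains u n))
      = (pvFallback.drop idx).filter (fun n => !(PySem.Set.contains u n))
    ∧ (pvSkip u idx < pvFallback.length →
        PySem.Set.contains u (pvFallback.getD (pvSkip u idx) "") = false) := by
  induction hn : pvFallback.length - idx generalizing idx with
  | zero =>
    rw [pvSkip]
    have hge : ¬ idx < pvFallback.length := by omega
    rw [if_neg (by tauto)]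
    exact ⟨rfl, fun h => absurd h hge⟩
  | succ n ih =>
    rw [pvSkip]
    by_cases hc : idx < pvFallback.length ∧ PySem.Set.contains u (pvFallback.getD idx "") = true
    · rw [if_pos hc]
      obtain ⟨h1, h2⟩ := ih (idx + 1) (by omega)
      refine ⟨?_, h2⟩
      rw [h1]
      have hdrop : pvFallback.drop idx = pvFallback.getD idx "" :: pvFallback.drop (idx + 1) := by
        rw [List.getD_eq_getElem _ _ hc.1]
        exact List.drop_eq_getElem_cons hc.1
      rw [hdrop, List.filter_cons]
      simp only [hc.2, Bool.not_true, Bool.false_eq_true, if_false]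
    · rw [if_neg hc]
      refine ⟨rfl, fun h => ?_⟩
      exact Bool.eq_false_iff.mpr (fun hb => hc ⟨h, hb⟩)

lemma nodup_pvFallback : pvFallback.Nodup := by decide

-- the single loop invariant: the not-yet-used fallback names from idx onward are avail.drop i
lemma pvLoop_eq (avail : List String) :
    ∀ (k : Nat) (res : List (List (String × String))) (u : PySem.Set String) (idx i : Nat),
    (pvFallback.drop idx).filter (fun n => !(PySem.Set.contains u n)) = avail.drop i →
    pvLoopA k res u idx = pvLoopB avail k i res u := by
  intro k
  induction k with
  | zero => intro res u idx i _; rfl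
  | succ k ih =>
    intro res u idx i hinv
    have hskip := pvSkip_filter u idx
    set j := pvSkip u idx with hj
    have hfj : (pvFallback.drop j).filter (fun n => !(PySem.Set.contains u n)) = avail.drop i :=
      hskip.1.trans hinv
    simp only [pvLoopA, pvLoopB, ← hj]
    by_cases hi : i < avail.length
    · -- fallback phase: both sides take avail[i]
      have hdi : avail.drop i = avail[i] :: avail.drop (i + 1) := List.drop_eq_getElem_cons hi
      have hjlt : j < pvFallback.length := by
        by_contra hge
        rw [List.drop_eq_nil_of_le (by omega), hdi] at hfj
        simp at hfj
        omega
      have hnotmem : PySem.Set.contains u (pvFallback.getD j "") = false := hskip.2 hjlt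
      have hdropj : pvFallback.drop j = pvFallback.getD j "" :: pvFallback.drop (j + 1) := by
        rw [List.getD_eq_getElem _ _ hjlt]
        exact List.drop_eq_getElem_cons hjlt
      rw [hdropj, List.filter_cons, hdi] at hfj
      simp only [hnotmem, Bool.not_false, if_true] at hfj
      obtain ⟨hname, htail⟩ := List.cons_eq_cons.mp hfj
      have hnameA : pvNameA u j = avail[i] := by rw [pvNameA, if_pos hjlt, hname]
      have hnameB : pvNameB avail u i = avail[i] := by
        rw [pvNameB, if_pos hi, List.getD_eq_getElem _ _ hi]
      -- avail[i] = pvFallback[j] does not occur again in pvFallback.drop (j+1)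
      have hnotin : avail[i] ∉ pvFallback.drop (j + 1) := by
        rw [← hname, List.getD_eq_getElem _ _ hjlt]
        have hnd : (pvFallback.drop j).Nodup := nodup_pvFallback.sublist (List.drop_sublist _ _)
        rw [List.drop_eq_getElem_cons hjlt] at hnd
        exact (List.nodup_cons.mp hnd).1
      have hfilter : (pvFallback.drop (j + 1)).filter
            (fun n => !(PySem.Set.contains (PySem.Set.add u avail[i]) n))
          = (pvFallback.drop (j + 1)).filter (fun n => !(PySem.Set.contains u n)) := by
        apply List.filter_congr
        intro n hn
        have hne : n ≠ avail[i] := fun he => hnotin (he ▸ hn)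
        have : (n ∈ PySem.Set.add u avail[i]) ↔ n ∈ u := by
          rw [PySem.Set.mem_add]; exact or_iff_left hne
        simp [PySem.Set.contains_eq_listContains, this]
      rw [hnameA, hnameB]
      exact ih _ _ _ _ (hfilter.trans htail)
    · -- Agent phase: both sides generate the same synthetic name
      have hdi : avail.drop i = [] := List.drop_eq_nil_of_le (by omega)
      rw [hdi] at hfj
      have hjge : ¬ j < pvFallback.length := by
        intro hjlt
        have hnotmem : PySem.Set.contains u (pvFallback.getD j "") = false := hskip.2 hjlt
        have hdropj : pvFallback.drop j = pvFallback.getD j "" :: pvFallback.drop (j + 1) := by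
          rw [List.getD_eq_getElem _ _ hjlt]
          exact List.drop_eq_getElem_cons hjlt
        rw [hdropj, List.filter_cons] at hfj
        simp only [hnotmem, Bool.not_false, if_true] at hfj
        exact absurd hfj (by simp)
      have hname : pvNameA u j = pvNameB avail u i := by
        rw [pvNameA, pvNameB, if_neg hjge, if_neg hi]
      rw [hname]
      apply ih
      have h1 : pvFallback.drop (j + 1) = [] := List.drop_eq_nil_of_le (by omega)
      have h2 : avail.drop (i + 1) = [] := List.drop_eq_nil_of_le (by omega)
      rw [h1, h2]
      rfl

-- ===== VERDICT (by name: the statement is the Claim_ definition above) =====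
theorem flock_fallback_names_py_spec : Claim_equal_flock_fallback_names_py := by
  intro count existing _
  unfold Spec_flock_fallback_names_py flock_fallback_names_py flock_fallback_names_py_alt
  exact pvLoop_eq _ _ _ _ 0 0 rfl
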